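-- pv_equiv track=rewrite | github.com/01000111-01000100/Python-Fundamentals | Functions - More Exercises/05. Multiplication Sign.py | multiplication_sign
-- ===== SOURCE A (Python) =====
-- def multiplication_sign(num_list):
--     negs = 0
--     if "0" in num_list:
--         return "zero"
--     for elem in num_list:
--         if "-" in elem:
--             negs += 1
--     if negs % 2 == 0:
--         return "positive"
--     else:
--         return "negative"
-- ===== SOURCE B (Python) =====
-- def multiplication_sign(num_list):
--     mul = {
--         ("positive", "positive"): "positive",
--         ("positive", "negative"): "negative",
--         ("positive", "zero"): "zero",
--         ("negative", "positive"): "negative",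
--         ("negative", "negative"): "positive",
--         ("negative", "zero"): "zero",
--         ("zero", "positive"): "zero",
--         ("zero", "negative"): "zero",
--         ("zero", "zero"): "zero",
--     }
--     result = "positive"
--     for elem in num_list:
--         s = "zero" if elem == "0" else ("negative" if "-" in elem else "positive")
--         result = mul[(result, s)]
--     return result
-- ===== Notes on version B (the rewrite author's own statement) =====
-- stated objective: alternative
-- what changed: Replaces the '0'-membership scan plus negative-count parity with a reduction over the three-valued sign monoid: each element is mapped to its sign string and the results are combined by a 3x3 sign-multiplication lookup table, 'zero' being absorbing.
import Mathlib
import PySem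

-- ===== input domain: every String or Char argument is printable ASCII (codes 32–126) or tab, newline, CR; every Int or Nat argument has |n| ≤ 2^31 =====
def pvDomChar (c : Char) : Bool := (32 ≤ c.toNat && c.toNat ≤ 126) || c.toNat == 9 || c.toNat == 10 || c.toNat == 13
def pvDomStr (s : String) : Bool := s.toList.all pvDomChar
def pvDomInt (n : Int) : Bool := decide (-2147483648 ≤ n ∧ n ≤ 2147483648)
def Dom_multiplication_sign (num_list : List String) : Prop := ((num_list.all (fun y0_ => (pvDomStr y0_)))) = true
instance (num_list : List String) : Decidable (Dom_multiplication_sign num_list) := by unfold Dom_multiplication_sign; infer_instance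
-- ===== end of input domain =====

-- B maps each element to a three-valued sign string and reduces with a 3x3 sign-multiplication lookup table ('zero' absorbing), instead of A's '0'-membership scan plus negative-count parity (alternative decomposition, same cost).


-- ===== PORT A =====
def multiplication_sign (num_list : List String) : String :=
  if "0" ∈ num_list then "zero"
  else
    let negs : Int := num_list.foldl (fun negs elem => if PySem.Str.isIn "-" elem then negs + 1 else negs) 0
    if PySem.Int.mod negs 2 = 0 then "positive" else "negative"

-- ===== PORT B =====
-- the 3x3 sign-multiplication table (Python dict literal)
def msMul : PySem.Dict (String × String) String := PySem.Dict.ofList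
  [ (("positive", "positive"), "positive"),
    (("positive", "negative"), "negative"),
    (("positive", "zero"), "zero"),
    (("negative", "positive"), "negative"),
    (("negative", "negative"), "positive"),
    (("negative", "zero"), "zero"),
    (("zero", "positive"), "zero"),
    (("zero", "negative"), "zero"),
    (("zero", "zero"), "zero") ]

-- s = "zero" if elem == "0" else ("negative" if "-" in elem else "positive")
def msElemSign (elem : String) : String :=
  if elem = "0" then "zero"
  else if PySem.Str.isIn "-" elem then "negative" else "positive"

-- result = mul[(result, s)]; the lookup never falls through (every reachable key is in the table),
-- so the .getD "" default is never used
def msStep (result : String) (elem : String) : String :=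
  (msMul.get? (result, msElemSign elem)).getD ""

def multiplication_sign_alt (num_list : List String) : String :=
  num_list.foldl msStep "positive"

-- ===== PRECONDITION & SPEC =====
def Spec_multiplication_sign (num_list : List String) (out : String) : Prop := out = multiplication_sign_alt num_list
instance (num_list : List String) (out : String) : Decidable (Spec_multiplication_sign num_list out) := by unfold Spec_multiplication_sign; infer_instance

-- ===== CLAIM =====
def Claim_equal_multiplication_sign : Prop := ∀ (num_list : List String), Dom_multiplication_sign num_list → Spec_multiplication_sign num_list (multiplication_sign num_list)

-- ===== LEMMAS AND PROOFS =====

theorem msStep_zero (e : String) : msStep "zero" e = "zero" := by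
  unfold msStep msElemSign; split_ifs <;> rfl

theorem foldl_msStep_zero (l : List String) : l.foldl msStep "zero" = "zero" := by
  induction l with
  | nil => rfl
  | cons e rest ih => rw [List.foldl_cons, msStep_zero, ih]

-- B's fold characterised, from each of the two non-zero accumulators.
theorem foldl_msStep_eq (l : List String) :
    (l.foldl msStep "positive" =
      if "0" ∈ l then "zero"
      else if l.countP (fun e => PySem.Str.isIn "-" e) % 2 = 0 then "positive" else "negative")
    ∧ (l.foldl msStep "negative" =
      if "0" ∈ l then "zero"
      else if l.countP (fun e => PySem.Str.isIn "-" e) % 2 = 0 then "negative" else "positive") := by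
  induction l with
  | nil => exact ⟨rfl, rfl⟩
  | cons e rest ih =>
    by_cases h0 : e = "0"
    · have hmem : "0" ∈ e :: rest := by rw [h0]; exact List.mem_cons_self
      have hsp : msStep "positive" e = "zero" := by
        unfold msStep msElemSign; rw [if_pos h0]; rfl
      have hsn : msStep "negative" e = "zero" := by
        unfold msStep msElemSign; rw [if_pos h0]; rfl
      constructor
      · rw [List.foldl_cons, hsp, foldl_msStep_zero, if_pos hmem]
      · rw [List.foldl_cons, hsn, foldl_msStep_zero, if_pos hmem]
    · have hz0 : ("0" ∈ e :: rest) ↔ ("0" ∈ rest) := by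
        constructor
        · intro h; rcases List.mem_cons.mp h with h | h
          · exact absurd h.symm h0
          · exact h
        · exact List.mem_cons_of_mem e
      have hcount : (e :: rest).countP (fun e => PySem.Str.isIn "-" e)
          = rest.countP (fun e => PySem.Str.isIn "-" e)
            + (if PySem.Str.isIn "-" e then 1 else 0) := by
        rw [List.countP_cons]
      by_cases hneg : PySem.Str.isIn "-" e = true
      · have hsp : msStep "positive" e = "negative" := by
          unfold msStep msElemSign; rw [if_neg h0, if_pos hneg]; rfl
        have hsn : msStep "negative" e = "positive" := by
          unfold msStep msElemSign; rw [if_neg h0, if_pos hneg]; rfl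
        constructor
        · rw [List.foldl_cons, hsp, ih.2]
          by_cases hz : "0" ∈ rest
          · rw [if_pos hz, if_pos (hz0.mpr hz)]
          · rw [if_neg hz, if_neg (fun h => hz (hz0.mp h)), hcount, if_pos hneg]
            rcases Nat.mod_two_eq_zero_or_one (rest.countP (fun e => PySem.Str.isIn "-" e)) with h | h
            · rw [if_pos h, if_neg (by omega)]
            · rw [if_neg (by omega), if_pos (by omega)]
        · rw [List.foldl_cons, hsn, ih.1]
          by_cases hz : "0" ∈ rest
          · rw [if_pos hz, if_pos (hz0.mpr hz)]
          · rw [if_neg hz, if_neg (fun h => hz (hz0.mp h)), hcount, if_pos hneg]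
            rcases Nat.mod_two_eq_zero_or_one (rest.countP (fun e => PySem.Str.isIn "-" e)) with h | h
            · rw [if_pos h, if_neg (by omega)]
            · rw [if_neg (by omega), if_pos (by omega)]
      · have hsp : msStep "positive" e = "positive" := by
          unfold msStep msElemSign; rw [if_neg h0, if_neg hneg]; rfl
        have hsn : msStep "negative" e = "negative" := by
          unfold msStep msElemSign; rw [if_neg h0, if_neg hneg]; rfl
        constructor
        · rw [List.foldl_cons, hsp, ih.1]
          by_cases hz : "0" ∈ rest
          · rw [if_pos hz, if_pos (hz0.mpr hz)]
          · rw [if_neg hz, if_neg (fun h => hz (hz0.mp h)), hcount, if_neg hneg, Nat.add_zero]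
        · rw [List.foldl_cons, hsn, ih.2]
          by_cases hz : "0" ∈ rest
          · rw [if_pos hz, if_pos (hz0.mpr hz)]
          · rw [if_neg hz, if_neg (fun h => hz (hz0.mp h)), hcount, if_neg hneg, Nat.add_zero]

-- ===== VERDICT =====
theorem multiplication_sign_spec : Claim_equal_multiplication_sign := by
  intro l _
  unfold Spec_multiplication_sign multiplication_sign multiplication_sign_alt
  rw [(foldl_msStep_eq l).1]
  by_cases h0 : "0" ∈ l
  · simp only [h0, if_true]
  · have hfold : l.foldl (fun negs elem => if PySem.Str.isIn "-" elem then negs + 1 else negs) (0 : Int)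
        = 0 + (l.countP (fun e => PySem.Str.isIn "-" e) : Int) :=
      PySem.List.foldl_if_add_one _ l 0
    set c := l.countP (fun e => PySem.Str.isIn "-" e) with hc
    have hparity : (PySem.Int.mod (0 + (c : Int)) 2 = 0) ↔ (c % 2 = 0) := by
      rw [PySem.Int.mod_eq_zero_iff_dvd, zero_add, Int.dvd_iff_emod_eq_zero]
      omega
    simp only [h0, if_false]
    rw [hfold]
    by_cases hp : c % 2 = 0
    · rw [if_pos (hparity.mpr hp), if_pos hp]
    · rw [if_neg (fun h => hp (hparity.mp h)), if_neg hp]
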